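-- pv_equiv track=rewrite | github.com/KimSangOuk/Coding_Test | CodingTest/Coding_Test/BAEKJOON/17472.py | mid_island
-- ===== SOURCE A (Python) =====
-- def mid_island(island,ax,ay,bx,by):
--   for i in range(1,len(island)):
--     for x,y in island[i]:
--       if x==ax and (ay<y<by or by<y<ay):
--         return False
--       elif y==ay and (ax<x<bx or bx<x<ax):
--         return False
--   return True
-- ===== SOURCE B (Python) =====
-- def mid_island(island, ax, ay, bx, by):
--     cells = [c for grp in island[1:] for c in grp]
--     ylo, yhi = min(ay, by), max(ay, by)
--     ys = [y for x, y in cells if x == ax and y > ylo]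
--     if ys and min(ys) < yhi:
--         return False
--     xlo, xhi = min(ax, bx), max(ax, bx)
--     xs = [x for x, y in cells if y == ay and x > xlo]
--     if xs and min(xs) < xhi:
--         return False
--     return True
-- ===== Notes on version B (the rewrite author's own statement) =====
-- stated objective: alternative
-- what changed: Instead of a per-cell early-return scan testing both un-normalised strict-interval conditions on every cell, B flattens island[1:] once, projects the cells on the target column (resp. row) that lie past the lower endpoint, and decides blockage by comparing the minimum of that projection with the upper endpoint.
import Mathlib
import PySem

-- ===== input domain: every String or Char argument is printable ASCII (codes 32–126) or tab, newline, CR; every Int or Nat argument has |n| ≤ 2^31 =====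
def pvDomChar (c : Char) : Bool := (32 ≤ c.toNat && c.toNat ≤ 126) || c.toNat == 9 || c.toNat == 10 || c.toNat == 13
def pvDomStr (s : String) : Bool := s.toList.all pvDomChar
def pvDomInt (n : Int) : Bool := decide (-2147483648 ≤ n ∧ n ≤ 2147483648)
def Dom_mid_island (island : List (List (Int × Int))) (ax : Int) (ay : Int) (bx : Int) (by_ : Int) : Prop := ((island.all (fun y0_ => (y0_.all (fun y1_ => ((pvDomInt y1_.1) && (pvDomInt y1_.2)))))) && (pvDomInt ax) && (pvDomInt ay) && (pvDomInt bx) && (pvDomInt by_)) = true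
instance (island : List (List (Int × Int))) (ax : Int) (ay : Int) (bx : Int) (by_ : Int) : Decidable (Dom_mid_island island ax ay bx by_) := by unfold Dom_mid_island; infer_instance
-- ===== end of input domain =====

-- B replaces A's per-cell early-return scan (with un-normalised interval tests) by projecting the
-- column/row cells past the lower endpoint and comparing their minimum with the upper endpoint;
-- objective: alternative decomposition, same O(n) cost.

-- ===== PORT A =====
-- inner loop `for x,y in island[i]` with the two early returns
def midRowA (ax ay bx by_ : Int) : List (Int × Int) → Bool
  | [] => true
  | (x, y) :: rest =>
    if x = ax ∧ (ay < y ∧ y < by_ ∨ by_ < y ∧ y < ay) then false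
    else if y = ay ∧ (ax < x ∧ x < bx ∨ bx < x ∧ x < ax) then false
    else midRowA ax ay bx by_ rest

-- outer loop `for i in range(1, len(island))`, visiting island[1:] in order
def midGoA (ax ay bx by_ : Int) : List (List (Int × Int)) → Bool
  | [] => true
  | grp :: rest =>
    if midRowA ax ay bx by_ grp then midGoA ax ay bx by_ rest else false

def mid_island (island : List (List (Int × Int))) (ax : Int) (ay : Int) (bx : Int) (by_ : Int) : Bool :=
  midGoA ax ay bx by_ (island.drop 1)

-- ===== PORT B =====
def mid_island_alt (island : List (List (Int × Int))) (ax : Int) (ay : Int) (bx : Int) (by_ : Int) : Bool :=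
  let cells := (island.drop 1).flatten
  let ylo := min ay by_
  let yhi := max ay by_
  let ys := (cells.filter (fun c => decide (c.1 = ax ∧ ylo < c.2))).map (fun c => c.2)
  if (match PySem.List.min? ys (fun y => y) with
      | some m => decide (m < yhi)
      | none => false) then false
  else
    let xlo := min ax bx
    let xhi := max ax bx
    let xs := (cells.filter (fun c => decide (c.2 = ay ∧ xlo < c.1))).map (fun c => c.1)
    if (match PySem.List.min? xs (fun x => x) with
        | some m => decide (m < xhi)
        | none => false) then false
    else true

-- ===== PRECONDITION & SPEC =====
def Spec_mid_island (island : List (List (Int × Int))) (ax : Int) (ay : Int) (bx : Int) (by_ : Int) (out : Bool) : Prop := out = mid_island_alt island ax ay bx by_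
instance (island : List (List (Int × Int))) (ax : Int) (ay : Int) (bx : Int) (by_ : Int) (out : Bool) : Decidable (Spec_mid_island island ax ay bx by_ out) := by unfold Spec_mid_island; infer_instance

-- ===== CLAIM (what is proved, stated in full; the proofs are below) =====
def Claim_equal_mid_island : Prop := ∀ (island : List (List (Int × Int))) (ax : Int) (ay : Int) (bx : Int) (by_ : Int), Dom_mid_island island ax ay bx by_ → Spec_mid_island island ax ay bx by_ (mid_island island ax ay bx by_)

-- ===== LEMMAS AND PROOFS =====

def pBlock (ax ay bx by_ : Int) (c : Int × Int) : Bool :=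
  decide ((c.1 = ax ∧ (ay < c.2 ∧ c.2 < by_ ∨ by_ < c.2 ∧ c.2 < ay)) ∨
          (c.2 = ay ∧ (ax < c.1 ∧ c.1 < bx ∨ bx < c.1 ∧ c.1 < ax)))

theorem midRowA_eq (ax ay bx by_ : Int) (grp : List (Int × Int)) :
    midRowA ax ay bx by_ grp = !grp.any (pBlock ax ay bx by_) := by
  induction grp with
  | nil => simp [midRowA]
  | cons c rest ih =>
    obtain ⟨x, y⟩ := c
    simp only [midRowA, List.any_cons, ih]
    split_ifs with h1 h2
    · have hb : pBlock ax ay bx by_ (x, y) = true := decide_eq_true (Or.inl h1)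
      simp [hb]
    · have hb : pBlock ax ay bx by_ (x, y) = true := decide_eq_true (Or.inr h2)
      simp [hb]
    · have hb : pBlock ax ay bx by_ (x, y) = false :=
        decide_eq_false (by rintro (hh | hh) <;> [exact h1 hh; exact h2 hh])
      simp [hb]

theorem midGoA_eq (ax ay bx by_ : Int) (grps : List (List (Int × Int))) :
    midGoA ax ay bx by_ grps = !grps.flatten.any (pBlock ax ay bx by_) := by
  induction grps with
  | nil => simp [midGoA]
  | cons g rest ih =>
    simp only [midGoA, midRowA_eq, List.flatten_cons, List.any_append, ih]
    split_ifs with h <;> simp_all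

theorem min_lt_iff_any (ys : List Int) (h : Int) :
    (match PySem.List.min? ys (fun y => y) with
     | some m => decide (m < h) | none => false) = ys.any (fun y => decide (y < h)) := by
  cases hm : PySem.List.min? ys (fun y => y) with
  | none =>
    have he : ys = [] := (PySem.List.min?_eq_none_iff ys (fun y => y)).mp hm
    simp [he]
  | some m =>
    have hmem := PySem.List.min?_mem hm
    have hmin := PySem.List.min?_isMin hm
    by_cases hlt : m < h
    · simp only [decide_eq_true hlt]
      exact (List.any_eq_true.mpr ⟨m, hmem, by simpa using hlt⟩).symm
    · simp only [decide_eq_false hlt]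
      symm; rw [List.any_eq_false]
      intro y hy hdy
      exact hlt (lt_of_le_of_lt (hmin y hy) (by simpa using hdy))

theorem filter_map_any (cells : List (Int × Int)) (p : Int × Int → Prop) [DecidablePred p]
    (f : Int × Int → Int) (hi : Int) :
    ((cells.filter (fun c => decide (p c))).map f).any (fun v => decide (v < hi)) =
      cells.any (fun c => decide (p c ∧ f c < hi)) := by
  induction cells with
  | nil => simp
  | cons c rest ih =>
    simp only [List.filter_cons]
    by_cases hp : p c
    · simp [hp, List.any_cons, ih]
    · simp [hp, List.any_cons, ih]

theorem any_congr_all (l : List (Int × Int)) (f g : Int × Int → Bool)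
    (h : ∀ c, f c = g c) : l.any f = l.any g := by
  induction l with
  | nil => simp
  | cons c rest ih => simp only [List.any_cons, h c, ih]

theorem any_or_split (l : List (Int × Int)) (f g : Int × Int → Bool) :
    l.any (fun c => f c || g c) = (l.any f || l.any g) := by
  induction l with
  | nil => simp
  | cons c rest ih =>
    simp only [List.any_cons, ih]
    cases f c <;> cases g c <;> simp

-- ===== VERDICT (by name: the statement is the Claim_ definition above) =====
theorem mid_island_spec : Claim_equal_mid_island := by
  intro island ax ay bx by_ _
  unfold Spec_mid_island mid_island mid_island_alt
  rw [midGoA_eq]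
  simp only [min_lt_iff_any,
    filter_map_any _ (fun c => c.1 = ax ∧ min ay by_ < c.2) (fun c => c.2) (max ay by_),
    filter_map_any _ (fun c => c.2 = ay ∧ min ax bx < c.1) (fun c => c.1) (max ax bx)]
  have hB : (island.drop 1).flatten.any (pBlock ax ay bx by_) =
      ((island.drop 1).flatten.any
          (fun c => decide ((c.1 = ax ∧ min ay by_ < c.2) ∧ c.2 < max ay by_)) ||
        (island.drop 1).flatten.any
          (fun c => decide ((c.2 = ay ∧ min ax bx < c.1) ∧ c.1 < max ax bx))) := by
    rw [← any_or_split]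
    apply any_congr_all
    intro c
    simp only [pBlock, ← Bool.decide_or]
    rw [decide_eq_decide]
    omega
  rw [hB]
  cases h1 : (island.drop 1).flatten.any
      (fun c => decide ((c.1 = ax ∧ min ay by_ < c.2) ∧ c.2 < max ay by_)) <;>
  cases h2 : (island.drop 1).flatten.any
      (fun c => decide ((c.2 = ay ∧ min ax bx < c.1) ∧ c.1 < max ax bx)) <;>
    simp
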